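-- pv_equiv track=rewrite | github.com/bniladri/RAG | heading_based.py | heading_based_chunking
-- ===== SOURCE A (Python) =====
-- def heading_based_chunking(text, heading_levels=[1, 2], chunk_size=2):
--     # Split the text into lines or paragraphs
--     paragraphs = text.split("\n")
--
--     chunks = []
--     current_chunk = []
--     current_heading = None
--
--     for paragraph in paragraphs:
--         # Check if the paragraph is a heading (this could be based on certain keywords, patterns, or font size)
--         if is_heading(paragraph, heading_levels):
--             if current_chunk:
--                 chunks.append(" ".join(current_chunk))
--                 current_chunk = []
--
--             current_heading = paragraph.strip()
--
--         current_chunk.append(paragraph.strip())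
--
--     if current_chunk:  # Add any remaining content as the final chunk
--         chunks.append(" ".join(current_chunk))
--
--     return chunks
--
-- def is_heading(text, heading_levels=[1, 2]):
--     # Determine if a line is a heading (dummy implementation based on keyword or simple pattern)
--     return any(f"Heading {level}" in text for level in heading_levels)
-- ===== SOURCE B (Python) =====
-- def heading_based_chunking(text, heading_levels=[1, 2], chunk_size=2):
--     paragraphs = text.split("\n")
--     heading_idxs = [i for i, p in enumerate(paragraphs)
--                     if is_heading(p, heading_levels)]
--     starts = sorted({0} | set(heading_idxs))
--     bounds = starts + [len(paragraphs)]
--     return [" ".join(p.strip() for p in paragraphs[s:e])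
--             for s, e in zip(bounds, bounds[1:])]
--
-- def is_heading(text, heading_levels=[1, 2]):
--     return any(f"Heading {level}" in text for level in heading_levels)
-- ===== Notes on version B (the rewrite author's own statement) =====
-- stated objective: alternative
-- what changed: B first computes the list of heading-line indices with one enumerate pass, forms the sorted start points {0} union indices, and builds each chunk by slicing the paragraph list between consecutive start points, instead of A's single accumulate-and-flush scan with a mutable current chunk.
import Mathlib
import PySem

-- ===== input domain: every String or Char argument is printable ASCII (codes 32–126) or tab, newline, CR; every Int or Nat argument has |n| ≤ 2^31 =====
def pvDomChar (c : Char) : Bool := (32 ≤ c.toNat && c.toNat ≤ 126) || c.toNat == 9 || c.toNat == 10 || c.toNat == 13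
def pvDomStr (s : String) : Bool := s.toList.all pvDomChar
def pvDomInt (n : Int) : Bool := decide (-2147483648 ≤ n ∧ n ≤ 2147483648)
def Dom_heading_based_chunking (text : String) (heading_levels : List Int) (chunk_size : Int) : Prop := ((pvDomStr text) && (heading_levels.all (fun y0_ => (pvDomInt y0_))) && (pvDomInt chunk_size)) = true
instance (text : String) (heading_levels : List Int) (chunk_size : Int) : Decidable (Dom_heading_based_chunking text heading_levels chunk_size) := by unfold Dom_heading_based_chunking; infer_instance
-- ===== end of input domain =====

-- B replaces A's accumulate-and-flush scan by precomputing the heading-line indices and slicing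
-- the paragraph list between consecutive start points (objective: alternative, same cost).

-- ===== PORT A =====
-- is_heading(text, heading_levels): any(f"Heading {level}" in text …)
def pvIsHeading (heading_levels : List Int) (p : List Char) : Bool :=
  heading_levels.any (fun level => PySem.Chars.isIn ("Heading ".toList ++ PySem.Int.toChars level) p)

-- current_heading is assigned but never read in A; it is omitted from the fold state.
-- chunk_size is unused by A (as in the Python source).
def heading_based_chunking (text : String) (heading_levels : List Int) (chunk_size : Int) : List String :=
  let paragraphs := PySem.Chars.splitOn text.toList "\n".toList
  let st := paragraphs.foldl
    (fun (st : List (List Char) × List (List Char)) paragraph =>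
      let st := if pvIsHeading heading_levels paragraph then
          (if st.2 ≠ [] then (st.1 ++ [PySem.Chars.join " ".toList st.2], ([] : List (List Char))) else st)
        else st
      (st.1, st.2 ++ [PySem.Chars.strip paragraph]))
    ([], [])
  (if st.2 ≠ [] then st.1 ++ [PySem.Chars.join " ".toList st.2] else st.1).map String.ofList

-- ===== PORT B =====
-- bounds[1:] is bounds.tail
def heading_based_chunking_alt (text : String) (heading_levels : List Int) (chunk_size : Int) : List String :=
  let paragraphs := PySem.Chars.splitOn text.toList "\n".toList
  let heading_idxs := (PySem.List.enumerate paragraphs).filterMap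
    (fun ip => if pvIsHeading heading_levels ip.2 then some ip.1 else none)
  let starts := PySem.List.sorted (PySem.Set.union (PySem.Set.ofList [(0 : Int)]) heading_idxs) (fun i => i)
  let bounds := starts ++ [(paragraphs.length : Int)]
  (bounds.zip bounds.tail).map (fun se =>
    String.ofList (PySem.Chars.join " ".toList
      ((PySem.List.slice paragraphs (some se.1) (some se.2)).map PySem.Chars.strip)))

-- ===== PRECONDITION & SPEC =====
def Spec_heading_based_chunking (text : String) (heading_levels : List Int) (chunk_size : Int) (out : List String) : Prop := out = heading_based_chunking_alt text heading_levels chunk_size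
instance (text : String) (heading_levels : List Int) (chunk_size : Int) (out : List String) : Decidable (Spec_heading_based_chunking text heading_levels chunk_size out) := by unfold Spec_heading_based_chunking; infer_instance

-- ===== CLAIM (what is proved, stated in full; the proofs are below) =====
def Claim_equal_heading_based_chunking : Prop := ∀ (text : String) (heading_levels : List Int) (chunk_size : Int), Dom_heading_based_chunking text heading_levels chunk_size → Spec_heading_based_chunking text heading_levels chunk_size (heading_based_chunking text heading_levels chunk_size)

-- ===== LEMMAS AND PROOFS =====

-- abbreviations for the pieces both ports share
def pvJ (cur : List (List Char)) : List Char := PySem.Chars.join " ".toList cur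

def pvStepA (hl : List Int) (st : List (List Char) × List (List Char)) (p : List Char) :
    List (List Char) × List (List Char) :=
  let st := if pvIsHeading hl p then
      (if st.2 ≠ [] then (st.1 ++ [pvJ st.2], ([] : List (List Char))) else st)
    else st
  (st.1, st.2 ++ [PySem.Chars.strip p])

def pvFlush (st : List (List Char) × List (List Char)) : List (List Char) :=
  if st.2 ≠ [] then st.1 ++ [pvJ st.2] else st.1

theorem pvA_unfold (text : String) (hl : List Int) (cs : Int) :
    heading_based_chunking text hl cs =
      (pvFlush ((PySem.Chars.splitOn text.toList "\n".toList).foldl (pvStepA hl) ([], []))).map String.ofList := rfl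

-- A's loop once the accumulator is nonempty
def pvGlue (hl : List Int) (cur : List (List Char)) : List (List Char) → List (List Char)
  | [] => [pvJ cur]
  | p :: rest =>
      if pvIsHeading hl p then pvJ cur :: pvGlue hl [PySem.Chars.strip p] rest
      else pvGlue hl (cur ++ [PySem.Chars.strip p]) rest

-- the common specification: chunks are "first line plus following non-heading lines", recursively
def pvChunks (hl : List Int) : List (List Char) → List (List Char)
  | [] => []
  | p :: rest =>
    pvJ (PySem.Chars.strip p :: (rest.takeWhile (fun q => !pvIsHeading hl q)).map PySem.Chars.strip) ::
      (match hrest : rest.dropWhile (fun q => !pvIsHeading hl q) with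
       | [] => []
       | q :: r2 => pvChunks hl (q :: r2))
termination_by l => l.length
decreasing_by
  have h := List.length_dropWhile_le (fun q => !pvIsHeading hl q) rest
  rw [hrest] at h
  simp at h ⊢
  omega

theorem pvChunks_cons_of_nil (hl : List Int) (p : List Char) (rest : List (List Char))
    (h : rest.dropWhile (fun q => !pvIsHeading hl q) = []) :
    pvChunks hl (p :: rest) =
      [pvJ (PySem.Chars.strip p :: (rest.takeWhile (fun q => !pvIsHeading hl q)).map PySem.Chars.strip)] := by
  rw [pvChunks]
  split
  · rfl
  · rename_i q r2 heq
    rw [h] at heq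
    exact absurd heq (by simp)

theorem pvChunks_cons_of_cons (hl : List Int) (p x : List Char) (rest r2 : List (List Char))
    (h : rest.dropWhile (fun q => !pvIsHeading hl q) = x :: r2) :
    pvChunks hl (p :: rest) =
      pvJ (PySem.Chars.strip p :: (rest.takeWhile (fun q => !pvIsHeading hl q)).map PySem.Chars.strip)
        :: pvChunks hl (x :: r2) := by
  rw [pvChunks]
  split
  · rename_i heq
    rw [h] at heq
    exact absurd heq (by simp)
  · rename_i q r heq
    rw [h] at heq
    cases heq
    rfl

theorem pvGo_ne_nil (sep : List Char) : ∀ (fuel : Nat) (l cur : List Char) (acc : List (List Char)),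
    PySem.Chars.splitOn.go sep fuel l cur acc ≠ [] := by
  intro fuel
  induction fuel with
  | zero => intro l cur acc; simp [PySem.Chars.splitOn.go]
  | succ n ih =>
    intro l cur acc
    cases l with
    | nil => simp [PySem.Chars.splitOn.go]
    | cons c rest =>
      rw [PySem.Chars.splitOn.go]
      split
      · exact ih _ _ _
      · exact ih _ _ _

theorem pvSplitOn_ne_nil (s sep : List Char) : PySem.Chars.splitOn s sep ≠ [] := by
  rw [PySem.Chars.splitOn]; exact pvGo_ne_nil _ _ _ _ _

-- ---------- A-side ----------

theorem pvFoldA_eq (hl : List Int) : ∀ (ps : List (List Char)) (chunks cur : List (List Char)),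
    cur ≠ [] → pvFlush (ps.foldl (pvStepA hl) (chunks, cur)) = chunks ++ pvGlue hl cur ps := by
  intro ps
  induction ps with
  | nil => intro chunks cur hcur; simp [pvFlush, pvGlue, hcur]
  | cons p rest ih =>
    intro chunks cur hcur
    by_cases hp : pvIsHeading hl p
    · have hstep : pvStepA hl (chunks, cur) p = (chunks ++ [pvJ cur], [PySem.Chars.strip p]) := by
        simp [pvStepA, hp, hcur]
      rw [List.foldl_cons, hstep, ih _ _ (by simp)]
      simp [pvGlue, hp]
    · have hstep : pvStepA hl (chunks, cur) p = (chunks, cur ++ [PySem.Chars.strip p]) := by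
        simp [pvStepA, hp]
      rw [List.foldl_cons, hstep, ih _ _ (by simp)]
      simp [pvGlue, hp]

theorem pvA_glue (hl : List Int) (p : List Char) (rest : List (List Char)) :
    pvFlush (((p :: rest).foldl (pvStepA hl) ([], []))) = pvGlue hl [PySem.Chars.strip p] rest := by
  have hstep : pvStepA hl ([], []) p = ([], [PySem.Chars.strip p]) := by
    simp [pvStepA]
  rw [List.foldl_cons, hstep, pvFoldA_eq hl rest [] [PySem.Chars.strip p] (by simp)]
  simp

theorem pvGlue_append (hl : List Int) : ∀ (pre : List (List Char)) (cur rest : List (List Char)),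
    (∀ q ∈ pre, pvIsHeading hl q = false) →
    pvGlue hl cur (pre ++ rest) = pvGlue hl (cur ++ pre.map PySem.Chars.strip) rest := by
  intro pre
  induction pre with
  | nil => intro cur rest _; simp
  | cons q pre ih =>
    intro cur rest hpre
    have hq : pvIsHeading hl q = false := hpre q (by simp)
    rw [List.cons_append, pvGlue, if_neg (by simp [hq])]
    rw [ih _ rest (fun x hx => hpre x (by simp [hx]))]
    simp

theorem pvDropWhile_head_false {α : Type} (p : α → Bool) :
    ∀ (l : List α) (x : α) (r : List α), l.dropWhile p = x :: r → p x = false := by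
  intro l
  induction l with
  | nil => intro x r h; simp [List.dropWhile] at h
  | cons a l ih =>
    intro x r h
    rw [List.dropWhile_cons] at h
    by_cases ha : p a
    · rw [if_pos ha] at h; exact ih x r h
    · rw [if_neg ha] at h
      cases h
      simpa using ha

theorem pvGlue_eq_chunks (hl : List Int) : ∀ (n : Nat) (p : List Char) (rest : List (List Char)),
    rest.length ≤ n → pvGlue hl [PySem.Chars.strip p] rest = pvChunks hl (p :: rest) := by
  intro n
  induction n with
  | zero =>
    intro p rest hlen
    have : rest = [] := List.eq_nil_of_length_eq_zero (Nat.le_zero.mp hlen)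
    subst this
    simp [pvGlue, pvChunks]
  | succ n ih =>
    intro p rest hlen
    have hsplit := List.takeWhile_append_dropWhile (p := fun q => !pvIsHeading hl q) (l := rest)
    have hpre : ∀ q ∈ rest.takeWhile (fun q => !pvIsHeading hl q), pvIsHeading hl q = false := by
      intro q hq
      have := List.mem_takeWhile_imp hq
      simpa using this
    cases hcase : rest.dropWhile (fun q => !pvIsHeading hl q) with
    | nil =>
      have hga := pvGlue_append hl (rest.takeWhile (fun q => !pvIsHeading hl q))
        [PySem.Chars.strip p] [] hpre
      rw [List.append_nil] at hga
      conv_lhs => rw [← hsplit, hcase, List.append_nil]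
      rw [hga, pvChunks_cons_of_nil hl p rest hcase]
      simp [pvGlue]
    | cons x r2 =>
      have hx : pvIsHeading hl x = true := by
        have := pvDropWhile_head_false (fun q => !pvIsHeading hl q) rest x r2 hcase
        simpa using this
      have hr2 : r2.length ≤ n := by
        have h1 := List.length_dropWhile_le (fun q => !pvIsHeading hl q) rest
        rw [hcase] at h1
        simp at h1
        omega
      conv_lhs => rw [← hsplit, hcase]
      rw [pvGlue_append hl _ _ (x :: r2) hpre]
      rw [pvGlue, if_pos hx, ih x r2 hr2,
        pvChunks_cons_of_cons hl p x rest r2 hcase]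
      simp

-- ---------- B-side ----------

def pvNatIdxs (hl : List Int) : List (List Char) → Nat → List Nat
  | [], _ => []
  | p :: ps, k => (if pvIsHeading hl p then [k] else []) ++ pvNatIdxs hl ps (k + 1)

theorem pvIdxs_eq (hl : List Int) : ∀ (ps : List (List Char)) (k : Nat),
    (PySem.List.enumerate ps (k : Int)).filterMap
        (fun ip => if pvIsHeading hl ip.2 then some ip.1 else none) =
      (pvNatIdxs hl ps k).map (fun n : Nat => (n : Int)) := by
  intro ps
  induction ps with
  | nil => intro k; simp [PySem.List.enumerate_nil, pvNatIdxs]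
  | cons p ps ih =>
    intro k
    rw [PySem.List.enumerate_cons, List.filterMap_cons]
    have hk : ((k : Int) + 1) = ((k + 1 : Nat) : Int) := by push_cast; ring
    by_cases hp : pvIsHeading hl p
    · simp only [hp, if_pos, pvNatIdxs, hk, ih (k + 1)]
      simp [hp]
    · simp only [pvNatIdxs, hp, hk, ih (k + 1)]
      simp [hp]

theorem pvNatIdxs_ge (hl : List Int) : ∀ (ps : List (List Char)) (k i : Nat),
    i ∈ pvNatIdxs hl ps k → k ≤ i := by
  intro ps
  induction ps with
  | nil => intro k i h; simp [pvNatIdxs] at h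
  | cons p ps ih =>
    intro k i h
    rw [pvNatIdxs, List.mem_append] at h
    rcases h with h | h
    · by_cases hp : pvIsHeading hl p
      · rw [if_pos hp] at h; simp at h; omega
      · rw [if_neg hp] at h; simp at h
    · have := ih (k + 1) i h; omega

theorem pvNatIdxs_pairwise (hl : List Int) : ∀ (ps : List (List Char)) (k : Nat),
    (pvNatIdxs hl ps k).Pairwise (· < ·) := by
  intro ps
  induction ps with
  | nil => intro k; simp [pvNatIdxs]
  | cons p ps ih =>
    intro k
    rw [pvNatIdxs]
    by_cases hp : pvIsHeading hl p
    · rw [if_pos hp]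
      simp only [List.singleton_append]
      exact List.Pairwise.cons (fun i hi => by have := pvNatIdxs_ge hl ps (k + 1) i hi; omega) (ih (k + 1))
    · rw [if_neg hp, List.nil_append]; exact ih (k + 1)

theorem pvNatIdxs_nil_of (hl : List Int) : ∀ (ps : List (List Char)) (k : Nat),
    (∀ q ∈ ps, pvIsHeading hl q = false) → pvNatIdxs hl ps k = [] := by
  intro ps
  induction ps with
  | nil => intro k _; simp [pvNatIdxs]
  | cons p ps ih =>
    intro k h
    rw [pvNatIdxs, if_neg (by simp [h p (by simp)]), List.nil_append]
    exact ih (k + 1) (fun q hq => h q (by simp [hq]))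

theorem pvNatIdxs_append (hl : List Int) : ∀ (xs ys : List (List Char)) (k : Nat),
    pvNatIdxs hl (xs ++ ys) k = pvNatIdxs hl xs k ++ pvNatIdxs hl ys (k + xs.length) := by
  intro xs
  induction xs with
  | nil => intro ys k; simp [pvNatIdxs]
  | cons x xs ih =>
    intro ys k
    rw [List.cons_append, pvNatIdxs, pvNatIdxs, ih ys (k + 1), List.append_assoc]
    have : k + 1 + xs.length = k + (x :: xs).length := by simp; omega
    rw [this]

theorem pvNatIdxs_shift (hl : List Int) : ∀ (ps : List (List Char)) (k j : Nat),
    pvNatIdxs hl ps (k + j) = (pvNatIdxs hl ps k).map (· + j) := by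
  intro ps
  induction ps with
  | nil => intro k j; simp [pvNatIdxs]
  | cons p ps ih =>
    intro k j
    rw [pvNatIdxs, pvNatIdxs, List.map_append]
    have : k + j + 1 = (k + 1) + j := by omega
    rw [this, ih (k + 1) j]
    by_cases hp : pvIsHeading hl p <;> simp [hp]

theorem pvUpdate_nodup : ∀ (l : List Int) (s : List Int), l.Nodup →
    PySem.Set.update s l = s ++ l.filter (fun x => !s.contains x) := by
  intro l
  induction l with
  | nil => intro s _; simp [PySem.Set.update]
  | cons x l ih =>
    intro s hnd
    have hxl : x ∉ l := (List.nodup_cons.mp hnd).1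
    have hl : l.Nodup := (List.nodup_cons.mp hnd).2
    have hstep : PySem.Set.update s (x :: l) = PySem.Set.update (PySem.Set.add s x) l := by
      simp [PySem.Set.update]
    by_cases hx : s.contains x
    · have hxm : x ∈ s := by simpa using hx
      have hadd : PySem.Set.add s x = s := by simp [PySem.Set.add, hxm]
      rw [hstep, hadd, ih s hl, List.filter_cons, if_neg (by simp [hxm])]
    · have hxm : x ∉ s := by simpa using hx
      have hadd : PySem.Set.add s x = s ++ [x] := by simp [PySem.Set.add, hxm]
      rw [hstep, hadd, ih (s ++ [x]) hl,
        List.filter_congr (l := l) (q := fun y => !s.contains y)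
          (fun y hy => by
            have hyx : y ≠ x := fun h => hxl (h ▸ hy)
            simp [hyx])]
      rw [List.filter_cons, if_pos (by simp [hxm])]
      simp

theorem pvStarts_eq (hl : List Int) (ps : List (List Char)) :
    PySem.List.sorted
        (PySem.Set.union (PySem.Set.ofList [(0 : Int)])
          ((PySem.List.enumerate ps (0 : Int)).filterMap
            (fun ip => if pvIsHeading hl ip.2 then some ip.1 else none)))
        (fun i => i) =
      (0 : Int) :: ((pvNatIdxs hl ps 0).filter (fun i => i ≠ 0)).map (fun n : Nat => (n : Int)) := by
  have hidxs : (PySem.List.enumerate ps (0 : Int)).filterMap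
      (fun ip => if pvIsHeading hl ip.2 then some ip.1 else none) =
      (pvNatIdxs hl ps 0).map (fun n : Nat => (n : Int)) := by
    have := pvIdxs_eq hl ps 0
    simpa using this
  have hpwN := pvNatIdxs_pairwise hl ps 0
  have hpwI : ((pvNatIdxs hl ps 0).map (fun n : Nat => (n : Int))).Pairwise (· < ·) := by
    rw [List.pairwise_map]
    exact hpwN.imp (fun h => by exact_mod_cast h)
  have hnodup : ((pvNatIdxs hl ps 0).map (fun n : Nat => (n : Int))).Nodup :=
    hpwI.imp (fun h => ne_of_lt h)
  have hupd := pvUpdate_nodup ((pvNatIdxs hl ps 0).map (fun n : Nat => (n : Int))) [(0 : Int)] hnodup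
  have hfil : ((pvNatIdxs hl ps 0).map (fun n : Nat => (n : Int))).filter
      (fun x => !([(0 : Int)]).contains x) =
      ((pvNatIdxs hl ps 0).filter (fun i => i ≠ 0)).map (fun n : Nat => (n : Int)) := by
    rw [List.filter_map]
    congr 1
    exact List.filter_congr (fun n _ => by simp)
  have hset : PySem.Set.union (PySem.Set.ofList [(0 : Int)])
      ((PySem.List.enumerate ps (0 : Int)).filterMap
        (fun ip => if pvIsHeading hl ip.2 then some ip.1 else none)) =
      (0 : Int) :: ((pvNatIdxs hl ps 0).filter (fun i => i ≠ 0)).map (fun n : Nat => (n : Int)) := by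
    rw [hidxs]
    show PySem.Set.update [(0 : Int)] _ = _
    rw [hupd, hfil]
    simp
  rw [hset]
  apply PySem.List.sorted_eq_of_perm_of_pairwise_lt
  · exact List.Perm.refl _
  · refine List.Pairwise.cons ?_ ?_
    · intro y hy
      rcases List.mem_map.mp hy with ⟨n, hn, rfl⟩
      have : n ≠ 0 := by simpa using (List.mem_filter.mp hn).2
      exact_mod_cast Nat.pos_of_ne_zero this
    · rw [List.pairwise_map]
      exact ((pvNatIdxs_pairwise hl ps 0).filter _).imp (fun h => by exact_mod_cast h)

def pvSliceMapN (ps : List (List Char)) (bs : List Nat) : List (List Char) :=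
  (bs.zip bs.tail).map (fun se => pvJ ((List.take (se.2 - se.1) (List.drop se.1 ps)).map PySem.Chars.strip))

theorem pvSliceMap_cast (ps : List (List Char)) (bs : List Nat) :
    (((bs.map (fun n : Nat => (n : Int))).zip (bs.map (fun n : Nat => (n : Int))).tail).map
      (fun se => String.ofList (PySem.Chars.join " ".toList
        ((PySem.List.slice ps (some se.1) (some se.2)).map PySem.Chars.strip)))) =
      (pvSliceMapN ps bs).map String.ofList := by
  rw [← List.map_tail, List.zip_map, pvSliceMapN, List.map_map, List.map_map]
  refine List.map_congr_left (fun se _ => ?_)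
  simp [Prod.map, pvJ, PySem.List.slice_natCast]

theorem pvAlt_unfold (text : String) (hl : List Int) (cs : Int) :
    heading_based_chunking_alt text hl cs =
      (pvSliceMapN (PySem.Chars.splitOn text.toList "\n".toList)
        ((0 :: (pvNatIdxs hl (PySem.Chars.splitOn text.toList "\n".toList) 0).filter (fun i => i ≠ 0))
          ++ [(PySem.Chars.splitOn text.toList "\n".toList).length])).map String.ofList := by
  show ((PySem.List.sorted (PySem.Set.union (PySem.Set.ofList [(0 : Int)]) _) (fun i => i)
      ++ [((PySem.Chars.splitOn text.toList "\n".toList).length : Int)]).zip _).map _ = _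
  rw [pvStarts_eq hl (PySem.Chars.splitOn text.toList "\n".toList)]
  rw [← pvSliceMap_cast (PySem.Chars.splitOn text.toList "\n".toList)
    ((0 :: (pvNatIdxs hl (PySem.Chars.splitOn text.toList "\n".toList) 0).filter (fun i => i ≠ 0))
      ++ [(PySem.Chars.splitOn text.toList "\n".toList).length])]
  simp

theorem pvSliceMapN_shift (ps : List (List Char)) (m : Nat) : ∀ (bs : List Nat),
    pvSliceMapN ps (bs.map (· + m)) = pvSliceMapN (ps.drop m) bs := by
  intro bs
  rw [pvSliceMapN, pvSliceMapN, ← List.map_tail, List.zip_map, List.map_map]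
  refine List.map_congr_left (fun se _ => ?_)
  have h1 : m + se.2 - (m + se.1) = se.2 - se.1 := by omega
  simp [Prod.map, List.drop_drop, Nat.add_comm, h1]

theorem pvFilter_pos (hl : List Int) (p : List Char) (rest : List (List Char)) :
    (pvNatIdxs hl (p :: rest) 0).filter (fun i => i ≠ 0) = pvNatIdxs hl rest 1 := by
  rw [pvNatIdxs, List.filter_append]
  by_cases hp : pvIsHeading hl p <;> simp [hp] <;>
    exact fun a ha => by have := pvNatIdxs_ge hl rest 1 a ha; omega

theorem pvSliceMapN_cons_cons (ps : List (List Char)) (a b : Nat) (bs : List Nat) :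
    pvSliceMapN ps (a :: b :: bs) =
      pvJ ((List.take (b - a) (List.drop a ps)).map PySem.Chars.strip) :: pvSliceMapN ps (b :: bs) := by
  simp [pvSliceMapN]

theorem pvB_eq_chunks (hl : List Int) : ∀ (n : Nat) (p : List Char) (rest : List (List Char)),
    rest.length ≤ n →
    pvSliceMapN (p :: rest) ((0 :: (pvNatIdxs hl (p :: rest) 0).filter (fun i => i ≠ 0))
        ++ [(p :: rest).length]) = pvChunks hl (p :: rest) := by
  intro n
  induction n with
  | zero =>
    intro p rest hlen
    have hrest : rest = [] := List.eq_nil_of_length_eq_zero (Nat.le_zero.mp hlen)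
    subst hrest
    rw [pvChunks_cons_of_nil hl p [] (by simp)]
    by_cases hp : pvIsHeading hl p <;> simp [pvNatIdxs, pvSliceMapN, hp]
  | succ n ih =>
    intro p rest hlen
    rw [pvFilter_pos hl p rest]
    have hsplit := List.takeWhile_append_dropWhile (p := fun q => !pvIsHeading hl q) (l := rest)
    have hpre : ∀ q ∈ rest.takeWhile (fun q => !pvIsHeading hl q), pvIsHeading hl q = false := by
      intro q hq
      simpa using List.mem_takeWhile_imp hq
    have hid : pvNatIdxs hl rest 1 =
        pvNatIdxs hl (rest.dropWhile (fun q => !pvIsHeading hl q))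
          (1 + (rest.takeWhile (fun q => !pvIsHeading hl q)).length) := by
      conv_lhs => rw [← hsplit]
      rw [pvNatIdxs_append, pvNatIdxs_nil_of hl _ 1 hpre, List.nil_append]
    cases hcase : rest.dropWhile (fun q => !pvIsHeading hl q) with
    | nil =>
      have htake : rest.takeWhile (fun q => !pvIsHeading hl q) = rest := by
        rw [hcase] at hsplit
        simpa using hsplit
      rw [hid, hcase, pvChunks_cons_of_nil hl p rest hcase, htake]
      simp [pvNatIdxs, pvSliceMapN]
      have hlm : rest.length = (List.map PySem.Chars.strip rest).length := by simp
      rw [hlm, List.take_length]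
    | cons x r2 =>
      have hx : pvIsHeading hl x = true := by
        simpa using pvDropWhile_head_false (fun q => !pvIsHeading hl q) rest x r2 hcase
      have hps : p :: rest = (p :: rest.takeWhile (fun q => !pvIsHeading hl q)) ++ (x :: r2) := by
        rw [List.cons_append, ← hcase, hsplit]
      have hlr : rest.length = (rest.takeWhile (fun q => !pvIsHeading hl q)).length + (r2.length + 1) := by
        conv_lhs => rw [← hsplit, hcase]
        simp
      have hr2 : r2.length ≤ n := by
        omega
      rw [hid, hcase, pvNatIdxs, if_pos hx]
      -- bounds are now 0 :: M :: (idxs of r2 ++ [N]) with M = 1 + |takeWhile|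
      simp only [List.cons_append, List.singleton_append, List.nil_append]
      rw [pvSliceMapN_cons_cons]
      have hM : (p :: rest.takeWhile (fun q => !pvIsHeading hl q)).length =
          1 + (rest.takeWhile (fun q => !pvIsHeading hl q)).length := by
        simp [Nat.add_comm]
      have hhead : List.take (1 + (rest.takeWhile (fun q => !pvIsHeading hl q)).length - 0)
          (List.drop 0 (p :: rest)) = p :: rest.takeWhile (fun q => !pvIsHeading hl q) := by
        rw [Nat.sub_zero, List.drop_zero, ← hM]
        conv_lhs => rw [hps]
        exact List.take_left
      have hshift : pvNatIdxs hl r2 (1 + (rest.takeWhile (fun q => !pvIsHeading hl q)).length + 1) =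
          (pvNatIdxs hl r2 1).map (· + (1 + (rest.takeWhile (fun q => !pvIsHeading hl q)).length)) := by
        have h := pvNatIdxs_shift hl r2 1 (1 + (rest.takeWhile (fun q => !pvIsHeading hl q)).length)
        rw [Nat.add_comm 1 (1 + (rest.takeWhile (fun q => !pvIsHeading hl q)).length)] at h
        exact h
      have hN : (p :: rest).length =
          (x :: r2).length + (1 + (rest.takeWhile (fun q => !pvIsHeading hl q)).length) := by
        simp [hlr]
        omega
      have htail : ((1 + (rest.takeWhile (fun q => !pvIsHeading hl q)).length) ::
            (pvNatIdxs hl r2 (1 + (rest.takeWhile (fun q => !pvIsHeading hl q)).length + 1)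
              ++ [(p :: rest).length])) =
          ((0 :: (pvNatIdxs hl r2 1 ++ [(x :: r2).length])).map
            (· + (1 + (rest.takeWhile (fun q => !pvIsHeading hl q)).length))) := by
        rw [hshift, hN]
        simp
      rw [htail, pvSliceMapN_shift]
      have hdrop : (p :: rest).drop (1 + (rest.takeWhile (fun q => !pvIsHeading hl q)).length) =
          x :: r2 := by
        conv_lhs => rw [hps, ← hM]
        exact List.drop_left
      rw [hdrop]
      have hihx := ih x r2 hr2
      rw [pvFilter_pos hl x r2] at hihx
      rw [List.cons_append] at hihx
      rw [hihx, pvChunks_cons_of_cons hl p x rest r2 hcase, hhead]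
      simp

-- ===== VERDICT (by name: the statement is the Claim_ definition above) =====
theorem heading_based_chunking_spec : Claim_equal_heading_based_chunking := by
  intro text hl cs _dom
  unfold Spec_heading_based_chunking
  rw [pvA_unfold, pvAlt_unfold]
  cases hps : PySem.Chars.splitOn text.toList "\n".toList with
  | nil => exact absurd hps (pvSplitOn_ne_nil _ _)
  | cons p rest =>
    rw [pvA_glue, pvGlue_eq_chunks hl rest.length p rest le_rfl,
      ← pvB_eq_chunks hl rest.length p rest le_rfl]
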